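-- pv_equiv track=rewrite | github.com/Aadityasamriya/HFAPI | bot/core/dynamic_fallback_strategy.py | _get_similar_models
-- ===== SOURCE A (Python) =====
-- from typing import Dict, List, Optional, Tuple, Any, Set
--
-- def _get_similar_models(failed_model: str, available_models: List[str], intent_type: str) -> List[str]:
--     """Get models similar to the failed one"""
--     # Extract model family/type
--     failed_lower = failed_model.lower()
--
--     similar_models = []
--     for model in available_models:
--         if model == failed_model:
--             continue
--
--         model_lower = model.lower()
--         similarity_score = 0
--
--         # Same provider family
--         if any(provider in failed_lower and provider in model_lower
--                for provider in ['meta', 'microsoft', 'qwen', 'huggingface']):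
--             similarity_score += 2
--
--         # Similar size indicators
--         if any(size in failed_lower and size in model_lower
--                for size in ['mini', 'small', 'medium', 'large', '7b', '13b', '70b']):
--             similarity_score += 1
--
--         # Similar capabilities
--         if any(cap in failed_lower and cap in model_lower
--                for cap in ['instruct', 'chat', 'code', 'reasoning']):
--             similarity_score += 1
--
--         similar_models.append((model, similarity_score))
--
--     # Sort by similarity and return
--     similar_models.sort(key=lambda x: x[1], reverse=True)
--     return [model for model, score in similar_models]
-- ===== SOURCE B (Python) =====
-- from typing import List
--
-- def _get_similar_models(failed_model: str, available_models: List[str], intent_type: str) -> List[str]: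
--     """Bucket (counting) sort over the fixed score range 0..4 instead of a comparison sort."""
--     failed_lower = failed_model.lower()
--     buckets = [[], [], [], [], []]
--     for model in available_models:
--         if model == failed_model:
--             continue
--         model_lower = model.lower()
--         score = (2 if any(p in failed_lower and p in model_lower
--                           for p in ('meta', 'microsoft', 'qwen', 'huggingface')) else 0) \
--               + (1 if any(s in failed_lower and s in model_lower
--                           for s in ('mini', 'small', 'medium', 'large', '7b', '13b', '70b')) else 0) \
--               + (1 if any(c in failed_lower and c in model_lower
--                           for c in ('instruct', 'chat', 'code', 'reasoning')) else 0)
--         buckets[score].append(model)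
--     return [m for s in range(4, -1, -1) for m in buckets[s]]
-- ===== Notes on version B (the rewrite author's own statement) =====
-- stated objective: alternative
-- what changed: Replaces collect-then-stable-sort of (model, score) pairs with a single-pass bucket (counting) sort into five score buckets concatenated highest-to-lowest, and computes the score as a sum of indicator terms instead of sequential accumulation.
import Mathlib
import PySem

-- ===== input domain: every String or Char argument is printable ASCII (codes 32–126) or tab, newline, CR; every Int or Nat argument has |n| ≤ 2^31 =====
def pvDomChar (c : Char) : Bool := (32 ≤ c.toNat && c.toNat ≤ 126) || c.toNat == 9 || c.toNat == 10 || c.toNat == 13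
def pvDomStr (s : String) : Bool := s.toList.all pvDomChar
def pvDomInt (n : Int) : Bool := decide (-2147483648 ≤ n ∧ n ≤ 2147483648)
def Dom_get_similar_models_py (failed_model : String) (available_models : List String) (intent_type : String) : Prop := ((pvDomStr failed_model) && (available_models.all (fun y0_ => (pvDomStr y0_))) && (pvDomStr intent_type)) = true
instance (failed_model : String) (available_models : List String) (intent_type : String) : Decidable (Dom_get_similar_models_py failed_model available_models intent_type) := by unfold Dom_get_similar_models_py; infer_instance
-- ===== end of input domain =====

-- B replaces A's collect-then-stable-sort with a one-pass bucket sort over the fixed score range 0..4 (objective: alternative).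

-- ===== PORT A =====
def pvProviders : List String := ["meta", "microsoft", "qwen", "huggingface"]
def pvSizes : List String := ["mini", "small", "medium", "large", "7b", "13b", "70b"]
def pvCaps : List String := ["instruct", "chat", "code", "reasoning"]

-- A's similarity_score accumulation, line for line
def pvScoreA (failed_lower model_lower : String) : Int :=
  let s : Int := 0
  let s := if pvProviders.any (fun p => PySem.Str.isIn p failed_lower && PySem.Str.isIn p model_lower) then s + 2 else s
  let s := if pvSizes.any (fun z => PySem.Str.isIn z failed_lower && PySem.Str.isIn z model_lower) then s + 1 else s
  let s := if pvCaps.any (fun c => PySem.Str.isIn c failed_lower && PySem.Str.isIn c model_lower) then s + 1 else s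
  s

def get_similar_models_py (failed_model : String) (available_models : List String) (intent_type : String) : List String :=
  let failed_lower := PySem.Str.lower failed_model
  let similar_models := available_models.foldl (fun acc model =>
    if model == failed_model then acc
    else acc ++ [(model, pvScoreA failed_lower (PySem.Str.lower model))]) []
  (PySem.List.sorted similar_models (fun x => x.2) true).map (fun x => x.1)

-- ===== PORT B =====
-- B's score: a sum of indicator terms
def pvScoreB (failed_lower model_lower : String) : Int :=
  (if pvProviders.any (fun p => PySem.Str.isIn p failed_lower && PySem.Str.isIn p model_lower) then 2 else 0)
  + (if pvSizes.any (fun z => PySem.Str.isIn z failed_lower && PySem.Str.isIn z model_lower) then 1 else 0)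
  + (if pvCaps.any (fun c => PySem.Str.isIn c failed_lower && PySem.Str.isIn c model_lower) then 1 else 0)

-- buckets[score].append(model): the 5-element bucket list as a 5-tuple (buckets 4,3,2,1,0 left to right)
def get_similar_models_py_alt (failed_model : String) (available_models : List String) (intent_type : String) : List String :=
  let failed_lower := PySem.Str.lower failed_model
  let b := available_models.foldl
    (fun (b : List String × List String × List String × List String × List String) model =>
      if model == failed_model then b
      else
        let s := pvScoreB failed_lower (PySem.Str.lower model)
        if s == 4 then (b.1 ++ [model], b.2.1, b.2.2.1, b.2.2.2.1, b.2.2.2.2)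
        else if s == 3 then (b.1, b.2.1 ++ [model], b.2.2.1, b.2.2.2.1, b.2.2.2.2)
        else if s == 2 then (b.1, b.2.1, b.2.2.1 ++ [model], b.2.2.2.1, b.2.2.2.2)
        else if s == 1 then (b.1, b.2.1, b.2.2.1, b.2.2.2.1 ++ [model], b.2.2.2.2)
        else (b.1, b.2.1, b.2.2.1, b.2.2.2.1, b.2.2.2.2 ++ [model]))
    ([], [], [], [], [])
  b.1 ++ (b.2.1 ++ (b.2.2.1 ++ (b.2.2.2.1 ++ b.2.2.2.2)))

-- ===== PRECONDITION & SPEC =====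
def Spec_get_similar_models_py (failed_model : String) (available_models : List String) (intent_type : String) (out : List String) : Prop := out = get_similar_models_py_alt failed_model available_models intent_type
instance (failed_model : String) (available_models : List String) (intent_type : String) (out : List String) : Decidable (Spec_get_similar_models_py failed_model available_models intent_type out) := by unfold Spec_get_similar_models_py; infer_instance

-- ===== CLAIM (what is proved, stated in full; the proofs are below) =====
def Claim_equal_get_similar_models_py : Prop := ∀ (failed_model : String) (available_models : List String) (intent_type : String), Dom_get_similar_models_py failed_model available_models intent_type → Spec_get_similar_models_py failed_model available_models intent_type (get_similar_models_py failed_model available_models intent_type)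

-- ===== LEMMAS AND PROOFS =====

theorem pvScoreB_eq_A (fl ml : String) : pvScoreB fl ml = pvScoreA fl ml := by
  unfold pvScoreA pvScoreB
  split_ifs <;> simp

theorem pvScoreA_bounds (fl ml : String) : 0 ≤ pvScoreA fl ml ∧ pvScoreA fl ml ≤ 4 := by
  unfold pvScoreA
  split_ifs <;> simp

-- x is inserted after every element it is not "before" and in front of the rest
theorem pvInsertBy_mid {α : Type} (before : α → α → Bool) (x : α) :
    ∀ (ys zs : List α), (∀ y ∈ ys, before x y = false) → (∀ z ∈ zs, before x z = true) →
    PySem.List.insertBy before x (ys ++ zs) = ys ++ x :: zs := by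
  intro ys
  induction ys with
  | nil =>
    intro zs _ h2
    cases zs with
    | nil => rfl
    | cons z zs =>
      simp [PySem.List.insertBy, h2 z (by simp)]
  | cons y ys ih =>
    intro zs h1 h2
    simp only [List.cons_append, PySem.List.insertBy, h1 y (by simp)]
    simp only [Bool.false_eq_true, if_false]
    rw [ih zs (fun a ha => h1 a (by simp [ha])) h2]

-- the stable reverse insertion-sort fold keeps buckets of equal keys in arrival order
theorem pvFoldIns {α : Type} (f : α → Int) :
    ∀ (ps c4 c3 c2 c1 c0 : List α),
    (∀ y ∈ c4, f y = 4) → (∀ y ∈ c3, f y = 3) → (∀ y ∈ c2, f y = 2) →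
    (∀ y ∈ c1, f y = 1) → (∀ y ∈ c0, f y = 0) →
    (∀ p ∈ ps, 0 ≤ f p ∧ f p ≤ 4) →
    ps.foldl (fun acc x => PySem.List.insertBy (fun a b => decide (f b < f a)) x acc)
        (c4 ++ (c3 ++ (c2 ++ (c1 ++ c0))))
    = (c4 ++ ps.filter (fun p => f p == 4)) ++
      ((c3 ++ ps.filter (fun p => f p == 3)) ++
       ((c2 ++ ps.filter (fun p => f p == 2)) ++
        ((c1 ++ ps.filter (fun p => f p == 1)) ++
         (c0 ++ ps.filter (fun p => f p == 0))))) := by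
  intro ps
  induction ps with
  | nil => intro c4 c3 c2 c1 c0 _ _ _ _ _ _; simp
  | cons x ps ih =>
    intro c4 c3 c2 c1 c0 h4 h3 h2 h1 h0 hps
    have hx := hps x (by simp)
    have hps' : ∀ p ∈ ps, 0 ≤ f p ∧ f p ≤ 4 := fun p hp => hps p (by simp [hp])
    rw [List.foldl_cons]
    have hfx : f x = 0 ∨ f x = 1 ∨ f x = 2 ∨ f x = 3 ∨ f x = 4 := by omega
    rcases hfx with h | h | h | h | h
    · -- f x = 0 : append at the very end
      rw [PySem.List.insertBy_of_forall_not_before _ x _ (by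
        intro y hy
        simp only [List.mem_append] at hy
        simp only [decide_eq_false_iff_not, not_lt, h]
        rcases hy with hy | hy | hy | hy | hy
        · have := h4 y hy; omega
        · have := h3 y hy; omega
        · have := h2 y hy; omega
        · have := h1 y hy; omega
        · have := h0 y hy; omega)]
      rw [show (c4 ++ (c3 ++ (c2 ++ (c1 ++ c0)))) ++ [x]
            = c4 ++ (c3 ++ (c2 ++ (c1 ++ (c0 ++ [x])))) by simp]
      rw [ih c4 c3 c2 c1 (c0 ++ [x]) h4 h3 h2 h1
        (by intro y hy; rcases List.mem_append.1 hy with hy | hy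
            · exact h0 y hy
            · simp only [List.mem_singleton] at hy; rw [hy]; exact h) hps']
      simp [List.filter_cons, h]
    · -- f x = 1
      rw [show c4 ++ (c3 ++ (c2 ++ (c1 ++ c0))) = (c4 ++ (c3 ++ (c2 ++ c1))) ++ c0 by simp]
      rw [pvInsertBy_mid _ x (c4 ++ (c3 ++ (c2 ++ c1))) c0
        (by intro y hy
            simp only [List.mem_append] at hy
            simp only [decide_eq_false_iff_not, not_lt, h]
            rcases hy with hy | hy | hy | hy
            · have := h4 y hy; omega
            · have := h3 y hy; omega
            · have := h2 y hy; omega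
            · have := h1 y hy; omega)
        (by intro z hz; simp only [decide_eq_true_eq, h]; have := h0 z hz; omega)]
      rw [show (c4 ++ (c3 ++ (c2 ++ c1))) ++ x :: c0
            = c4 ++ (c3 ++ (c2 ++ ((c1 ++ [x]) ++ c0))) by simp]
      rw [ih c4 c3 c2 (c1 ++ [x]) c0 h4 h3 h2
        (by intro y hy; rcases List.mem_append.1 hy with hy | hy
            · exact h1 y hy
            · simp only [List.mem_singleton] at hy; rw [hy]; exact h) h0 hps']
      simp [List.filter_cons, h]
    · -- f x = 2
      rw [show c4 ++ (c3 ++ (c2 ++ (c1 ++ c0))) = (c4 ++ (c3 ++ c2)) ++ (c1 ++ c0) by simp]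
      rw [pvInsertBy_mid _ x (c4 ++ (c3 ++ c2)) (c1 ++ c0)
        (by intro y hy
            simp only [List.mem_append] at hy
            simp only [decide_eq_false_iff_not, not_lt, h]
            rcases hy with hy | hy | hy
            · have := h4 y hy; omega
            · have := h3 y hy; omega
            · have := h2 y hy; omega)
        (by intro z hz
            simp only [List.mem_append] at hz
            simp only [decide_eq_true_eq, h]
            rcases hz with hz | hz
            · have := h1 z hz; omega
            · have := h0 z hz; omega)]
      rw [show (c4 ++ (c3 ++ c2)) ++ x :: (c1 ++ c0)
            = c4 ++ (c3 ++ ((c2 ++ [x]) ++ (c1 ++ c0))) by simp]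
      rw [ih c4 c3 (c2 ++ [x]) c1 c0 h4 h3
        (by intro y hy; rcases List.mem_append.1 hy with hy | hy
            · exact h2 y hy
            · simp only [List.mem_singleton] at hy; rw [hy]; exact h) h1 h0 hps']
      simp [List.filter_cons, h]
    · -- f x = 3
      rw [show c4 ++ (c3 ++ (c2 ++ (c1 ++ c0))) = (c4 ++ c3) ++ (c2 ++ (c1 ++ c0)) by simp]
      rw [pvInsertBy_mid _ x (c4 ++ c3) (c2 ++ (c1 ++ c0))
        (by intro y hy
            simp only [List.mem_append] at hy
            simp only [decide_eq_false_iff_not, not_lt, h]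
            rcases hy with hy | hy
            · have := h4 y hy; omega
            · have := h3 y hy; omega)
        (by intro z hz
            simp only [List.mem_append] at hz
            simp only [decide_eq_true_eq, h]
            rcases hz with hz | hz | hz
            · have := h2 z hz; omega
            · have := h1 z hz; omega
            · have := h0 z hz; omega)]
      rw [show (c4 ++ c3) ++ x :: (c2 ++ (c1 ++ c0))
            = c4 ++ ((c3 ++ [x]) ++ (c2 ++ (c1 ++ c0))) by simp]
      rw [ih c4 (c3 ++ [x]) c2 c1 c0 h4
        (by intro y hy; rcases List.mem_append.1 hy with hy | hy
            · exact h3 y hy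
            · simp only [List.mem_singleton] at hy; rw [hy]; exact h) h2 h1 h0 hps']
      simp [List.filter_cons, h]
    · -- f x = 4
      rw [pvInsertBy_mid _ x c4 (c3 ++ (c2 ++ (c1 ++ c0)))
        (by intro y hy
            simp only [decide_eq_false_iff_not, not_lt, h]
            have := h4 y hy; omega)
        (by intro z hz
            simp only [List.mem_append] at hz
            simp only [decide_eq_true_eq, h]
            rcases hz with hz | hz | hz | hz
            · have := h3 z hz; omega
            · have := h2 z hz; omega
            · have := h1 z hz; omega
            · have := h0 z hz; omega)]
      rw [show c4 ++ x :: (c3 ++ (c2 ++ (c1 ++ c0)))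
            = (c4 ++ [x]) ++ (c3 ++ (c2 ++ (c1 ++ c0))) by simp]
      rw [ih (c4 ++ [x]) c3 c2 c1 c0
        (by intro y hy; rcases List.mem_append.1 hy with hy | hy
            · exact h4 y hy
            · simp only [List.mem_singleton] at hy; rw [hy]; exact h) h3 h2 h1 h0 hps']
      simp [List.filter_cons, h]

theorem pvSorted_buckets {α : Type} (f : α → Int) (ps : List α)
    (h : ∀ p ∈ ps, 0 ≤ f p ∧ f p ≤ 4) :
    PySem.List.sorted ps f true
    = ps.filter (fun p => f p == 4) ++ (ps.filter (fun p => f p == 3) ++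
      (ps.filter (fun p => f p == 2) ++ (ps.filter (fun p => f p == 1) ++
       ps.filter (fun p => f p == 0)))) := by
  have := pvFoldIns f ps [] [] [] [] []
    (by simp) (by simp) (by simp) (by simp) (by simp) h
  simpa [PySem.List.sorted_rev_eq_foldl_insertBy] using this

-- A's pair-collecting fold is a filter-then-map
theorem pvAfold (failed_model : String) (fl : String) :
    ∀ (ms : List String) (acc : List (String × Int)),
    ms.foldl (fun acc model =>
        if model == failed_model then acc
        else acc ++ [(model, pvScoreA fl (PySem.Str.lower model))]) acc
    = acc ++ (ms.filter (fun m => !(m == failed_model))).map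
        (fun m => (m, pvScoreA fl (PySem.Str.lower m))) := by
  intro ms
  induction ms with
  | nil => simp
  | cons m ms ih =>
    intro acc
    rw [List.foldl_cons]
    by_cases hm : (m == failed_model) = true
    · rw [if_pos hm, ih]
      simp [List.filter_cons, hm]
    · rw [if_neg hm, ih]
      simp only [Bool.not_eq_true] at hm
      simp [List.filter_cons, hm]

-- B's bucket fold, bucket by bucket
theorem pvBfold (failed_model : String) (fl : String) :
    ∀ (ms : List String) (b4 b3 b2 b1 b0 : List String),
    ms.foldl (fun (b : List String × List String × List String × List String × List String) model =>
      if model == failed_model then b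
      else
        let s := pvScoreB fl (PySem.Str.lower model)
        if s == 4 then (b.1 ++ [model], b.2.1, b.2.2.1, b.2.2.2.1, b.2.2.2.2)
        else if s == 3 then (b.1, b.2.1 ++ [model], b.2.2.1, b.2.2.2.1, b.2.2.2.2)
        else if s == 2 then (b.1, b.2.1, b.2.2.1 ++ [model], b.2.2.2.1, b.2.2.2.2)
        else if s == 1 then (b.1, b.2.1, b.2.2.1, b.2.2.2.1 ++ [model], b.2.2.2.2)
        else (b.1, b.2.1, b.2.2.1, b.2.2.2.1, b.2.2.2.2 ++ [model])) (b4, b3, b2, b1, b0)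
    = (b4 ++ ms.filter (fun m => !(m == failed_model) && (pvScoreB fl (PySem.Str.lower m) == 4)),
       b3 ++ ms.filter (fun m => !(m == failed_model) && (pvScoreB fl (PySem.Str.lower m) == 3)),
       b2 ++ ms.filter (fun m => !(m == failed_model) && (pvScoreB fl (PySem.Str.lower m) == 2)),
       b1 ++ ms.filter (fun m => !(m == failed_model) && (pvScoreB fl (PySem.Str.lower m) == 1)),
       b0 ++ ms.filter (fun m => !(m == failed_model) && !(pvScoreB fl (PySem.Str.lower m) == 4)
              && !(pvScoreB fl (PySem.Str.lower m) == 3) && !(pvScoreB fl (PySem.Str.lower m) == 2)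
              && !(pvScoreB fl (PySem.Str.lower m) == 1))) := by
  intro ms
  induction ms with
  | nil => simp
  | cons m ms ih =>
    intro b4 b3 b2 b1 b0
    rw [List.foldl_cons]
    by_cases hm : (m == failed_model) = true
    · rw [if_pos hm, ih]
      simp [List.filter_cons, hm]
    · rw [if_neg hm]
      simp only [Bool.not_eq_true] at hm
      by_cases h4 : (pvScoreB fl (PySem.Str.lower m) == 4) = true
      · simp only [h4, if_true, ih]
        simp [List.filter_cons, hm, h4]
        simp only [beq_iff_eq] at h4
        omega
      · simp only [Bool.not_eq_true] at h4
        by_cases h3 : (pvScoreB fl (PySem.Str.lower m) == 3) = true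
        · simp only [h4, h3, Bool.false_eq_true, if_false, if_true, ih]
          simp [List.filter_cons, hm, h4, h3]
          simp only [beq_iff_eq] at h3
          omega
        · simp only [Bool.not_eq_true] at h3
          by_cases h2 : (pvScoreB fl (PySem.Str.lower m) == 2) = true
          · simp only [h4, h3, h2, Bool.false_eq_true, if_false, if_true, ih]
            simp [List.filter_cons, hm, h4, h3, h2]
            simp only [beq_iff_eq] at h2
            omega
          · simp only [Bool.not_eq_true] at h2
            by_cases h1 : (pvScoreB fl (PySem.Str.lower m) == 1) = true
            · simp only [h4, h3, h2, h1, Bool.false_eq_true, if_false, if_true, ih]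
              simp [List.filter_cons, hm, h4, h3, h2, h1]
            · simp only [Bool.not_eq_true] at h1
              simp only [h4, h3, h2, h1, Bool.false_eq_true, if_false, ih]
              simp [List.filter_cons, hm, h4, h3, h2, h1]

-- ===== VERDICT (by name: the statement is the Claim_ definition above) =====
theorem get_similar_models_py_spec : Claim_equal_get_similar_models_py := by
  intro fm ams it _
  unfold Spec_get_similar_models_py get_similar_models_py get_similar_models_py_alt
  simp only [pvAfold fm (PySem.Str.lower fm) ams [], pvBfold fm (PySem.Str.lower fm) ams [] [] [] [] [],
    List.nil_append, List.append_nil]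
  rw [pvSorted_buckets (α := String × Int) (fun p => p.2) _ (by
    intro p hp
    simp only [List.mem_map] at hp
    obtain ⟨m, _, rfl⟩ := hp
    exact pvScoreA_bounds _ _)]
  simp only [List.map_append, List.filter_map, List.map_map, Function.comp_def,
    List.filter_filter, pvScoreB_eq_A, List.map_id']
  refine congrArg₂ (· ++ ·) ?_ (congrArg₂ (· ++ ·) ?_ (congrArg₂ (· ++ ·) ?_ (congrArg₂ (· ++ ·) ?_ ?_)))
  · exact List.filter_congr (fun m _ => Bool.and_comm _ _)
  · exact List.filter_congr (fun m _ => Bool.and_comm _ _)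
  · exact List.filter_congr (fun m _ => Bool.and_comm _ _)
  · exact List.filter_congr (fun m _ => Bool.and_comm _ _)
  · apply List.filter_congr
    intro m _
    have hb := pvScoreA_bounds (PySem.Str.lower fm) (PySem.Str.lower m)
    have h5 : pvScoreA (PySem.Str.lower fm) (PySem.Str.lower m) = 0 ∨
        pvScoreA (PySem.Str.lower fm) (PySem.Str.lower m) = 1 ∨
        pvScoreA (PySem.Str.lower fm) (PySem.Str.lower m) = 2 ∨
        pvScoreA (PySem.Str.lower fm) (PySem.Str.lower m) = 3 ∨
        pvScoreA (PySem.Str.lower fm) (PySem.Str.lower m) = 4 := by omega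
    rcases h5 with h | h | h | h | h <;> simp [h]
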